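-- pv_equiv track=rewrite | github.com/isac7722/skills | notion-update/scripts/update.py | _route_by_role
-- ===== SOURCE A (Python) =====
-- def _route_by_role(data: dict, field_map: dict) -> dict:
--     """data의 role-like 키를 field_map 실제 키로 리매핑한다.
--
--     우선순위:
--       1. data의 키가 field_map에 그대로 존재하면 그대로 유지
--       2. data의 키와 role이 일치하는 field_map 엔트리가 있으면 그 키로 리네임
--       3. 매칭 실패 시 원본 유지 (body 같은 예약 키, 오타 등)
--     """
--     routed: dict = {}
--     keys = set(field_map.keys())
--     role_index: dict[str, str] = {}
--     for key, entry in field_map.items():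
--         role = entry.get("role")
--         if role and role not in role_index:
--             role_index[role] = key
--
--     for data_key, value in data.items():
--         if data_key in keys:
--             routed[data_key] = value
--             continue
--         target = role_index.get(data_key)
--         if target:
--             routed[target] = value
--             continue
--         routed[data_key] = value
--     return routed
-- ===== SOURCE B (Python) =====
-- def _route_by_role(data: dict, field_map: dict) -> dict:
--     """Single pass over data: keep keys that exist in field_map, otherwise rename
--     to the first field_map key whose entry's role matches the data key."""
--     routed = {}
--     for data_key, value in data.items():
--         if data_key in field_map:
--             routed[data_key] = value
--             continue
--         for key, entry in field_map.items():
--             role = entry.get("role")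
--             if role and role == data_key:
--                 routed[key] = value
--                 break
--         else:
--             routed[data_key] = value
--     return routed
-- ===== Notes on version B (the rewrite author's own statement) =====
-- stated objective: simpler
-- what changed: B drops A's pre-built keys set and role_index dict and does one pass over data, scanning field_map inline (for/break) for the first entry whose truthy role equals the data key.
-- intended difference: On inputs where a data key absent from field_map first matches a truthy role whose field_map key is the empty string, A's 'if target:' truthiness check accidentally discards the match and keeps the original key, while B renames to the matched key as the docstring's rename rule intends. — e.g. on _route_by_role([("x", "1")], [("", [("role", "x")])]): A returns [("x", "1")], B returns [("", "1")]
import Mathlib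
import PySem

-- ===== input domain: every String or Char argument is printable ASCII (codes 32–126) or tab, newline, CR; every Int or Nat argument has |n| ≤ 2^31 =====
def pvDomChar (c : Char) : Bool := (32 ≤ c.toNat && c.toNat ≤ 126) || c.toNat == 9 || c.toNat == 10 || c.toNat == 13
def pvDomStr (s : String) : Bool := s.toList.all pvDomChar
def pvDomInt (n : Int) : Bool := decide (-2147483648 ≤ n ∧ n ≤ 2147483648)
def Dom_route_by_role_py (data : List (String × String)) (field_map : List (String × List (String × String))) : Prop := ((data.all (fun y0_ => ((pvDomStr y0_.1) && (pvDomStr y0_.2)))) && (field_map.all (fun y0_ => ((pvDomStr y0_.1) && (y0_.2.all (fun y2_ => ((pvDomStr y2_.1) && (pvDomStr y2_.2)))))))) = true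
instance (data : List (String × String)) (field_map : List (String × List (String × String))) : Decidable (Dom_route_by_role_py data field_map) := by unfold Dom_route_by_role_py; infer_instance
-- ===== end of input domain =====

-- B replaces A's pre-built keys set and role_index with a single pass over data scanning
-- field_map inline for the first truthy-role match (objective: simpler); on the corner D_
-- (first match sits at an empty-string field_map key) B renames where A's `if target:` does not.


-- ===== PORT A =====
-- keys = set(field_map.keys()); role_index built by a first-wins loop; then the routing loop.
def route_by_role_py (data : List (String × String)) (field_map : List (String × List (String × String))) : List (String × String) :=
  let fm : PySem.Dict String (List (String × String)) := PySem.Dict.ofList field_map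
  let d : PySem.Dict String String := PySem.Dict.ofList data
  let keys : List String := PySem.Set.ofList (PySem.Dict.keys fm)
  let roleIndex : PySem.Dict String String :=
    (PySem.Dict.items fm).foldl (fun ri p =>
      match PySem.Dict.get? (PySem.Dict.ofList p.2) "role" with
      | some role => if role ≠ "" ∧ ri.contains role = false then ri.insert role p.1 else ri
      | none => ri) PySem.Dict.empty
  let routed : PySem.Dict String String :=
    (PySem.Dict.items d).foldl (fun r p =>
      if keys.contains p.1 then r.insert p.1 p.2
      else
        match PySem.Dict.get? roleIndex p.1 with
        | some target => if target ≠ "" then r.insert target p.2 else r.insert p.1 p.2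
        | none => r.insert p.1 p.2) PySem.Dict.empty
  PySem.Dict.items routed

-- ===== PORT B =====
-- first field_map entry whose truthy role equals dk (the inner for/break loop of Source B)
def pvFindRole (fmItems : List (String × List (String × String))) (dk : String) : Option String :=
  match fmItems with
  | [] => none
  | (k, entry) :: rest =>
    match PySem.Dict.get? (PySem.Dict.ofList entry) "role" with
    | some role => if role ≠ "" ∧ role = dk then some k else pvFindRole rest dk
    | none => pvFindRole rest dk

def route_by_role_py_alt (data : List (String × String)) (field_map : List (String × List (String × String))) : List (String × String) :=
  let fm : PySem.Dict String (List (String × String)) := PySem.Dict.ofList field_map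
  let d : PySem.Dict String String := PySem.Dict.ofList data
  let routed : PySem.Dict String String :=
    (PySem.Dict.items d).foldl (fun r p =>
      if fm.contains p.1 then r.insert p.1 p.2
      else
        match pvFindRole (PySem.Dict.items fm) p.1 with
        | some k => r.insert k p.2
        | none => r.insert p.1 p.2) PySem.Dict.empty
  PySem.Dict.items routed

-- ===== PRECONDITION & SPEC =====
-- helper for D_: the key of the first field_map entry whose truthy role equals dk (input inspection only)
def pvFirstRoleKey (fmItems : List (String × List (String × String))) (dk : String) : Option String :=
  (fmItems.find? (fun p => dk != "" && (PySem.Dict.getD (PySem.Dict.ofList p.2) "role" "" == dk))).map Prod.fst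

-- On inputs where a data key absent from field_map first matches a truthy role whose field_map
-- key is the empty string, A's `if target:` truthiness check accidentally discards the match and
-- keeps the original key, while B renames to the matched key as the docstring's rename rule intends.
def D_route_by_role_py (data : List (String × String)) (field_map : List (String × List (String × String))) : Prop :=
  ((PySem.Dict.ofList data).keys.any (fun dk =>
    !(PySem.Dict.ofList field_map).contains dk &&
    pvFirstRoleKey (PySem.Dict.items (PySem.Dict.ofList field_map)) dk == some "")) = true
instance (data : List (String × String)) (field_map : List (String × List (String × String))) : Decidable (D_route_by_role_py data field_map) := by unfold D_route_by_role_py; infer_instance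

def Spec_route_by_role_py (data : List (String × String)) (field_map : List (String × List (String × String))) (out : List (String × String)) : Prop := ¬ D_route_by_role_py data field_map → out = route_by_role_py_alt data field_map
instance (data : List (String × String)) (field_map : List (String × List (String × String))) (out : List (String × String)) : Decidable (Spec_route_by_role_py data field_map out) := by unfold Spec_route_by_role_py; infer_instance

def pvDiffWitness_route_by_role_py : (List (String × String)) × (List (String × List (String × String))) :=
  ([("x", "1")], [("", [("role", "x")])])
def pvDiffWitnessOut_route_by_role_py : (List (String × String)) × (List (String × String)) :=
  ([("x", "1")], [("", "1")])

-- ===== CLAIM (what is proved, stated in full; the proofs are below) =====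
def Claim_unchanged_route_by_role_py : Prop := ∀ (data : List (String × String)) (field_map : List (String × List (String × String))), Dom_route_by_role_py data field_map → Spec_route_by_role_py data field_map (route_by_role_py data field_map)
def Claim_exact_route_by_role_py : Prop := ∀ (data : List (String × String)) (field_map : List (String × List (String × String))), Dom_route_by_role_py data field_map → D_route_by_role_py data field_map → route_by_role_py data field_map ≠ route_by_role_py_alt data field_map
def Claim_changed_route_by_role_py : Prop := Dom_route_by_role_py (pvDiffWitness_route_by_role_py.1) (pvDiffWitness_route_by_role_py.2) ∧ D_route_by_role_py (pvDiffWitness_route_by_role_py.1) (pvDiffWitness_route_by_role_py.2) ∧ route_by_role_py (pvDiffWitness_route_by_role_py.1) (pvDiffWitness_route_by_role_py.2) = pvDiffWitnessOut_route_by_role_py.1 ∧ route_by_role_py_alt (pvDiffWitness_route_by_role_py.1) (pvDiffWitness_route_by_role_py.2) = pvDiffWitnessOut_route_by_role_py.2 ∧ pvDiffWitnessOut_route_by_role_py.1 ≠ pvDiffWitnessOut_route_by_role_py.2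

-- ===== LEMMAS AND PROOFS =====

-- A's role_index lookup equals B's first-match scan (first-wins invariant of the fold).
theorem roleIndex_get?_eq (l : List (String × List (String × String)))
    (ri : PySem.Dict String String) (dk : String) :
    PySem.Dict.get? (l.foldl (fun ri p =>
      match PySem.Dict.get? (PySem.Dict.ofList p.2) "role" with
      | some role => if role ≠ "" ∧ ri.contains role = false then ri.insert role p.1 else ri
      | none => ri) ri) dk
    = match PySem.Dict.get? ri dk with
      | some v => some v
      | none => pvFindRole l dk := by
  induction l generalizing ri with
  | nil => simp [pvFindRole]; cases PySem.Dict.get? ri dk <;> rfl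
  | cons p rest ih =>
    obtain ⟨k, entry⟩ := p
    simp only [List.foldl_cons, pvFindRole]
    cases hrole : PySem.Dict.get? (PySem.Dict.ofList entry) "role" with
    | none => rw [ih]
    | some role =>
      by_cases hne : role ≠ "" ∧ ri.contains role = false
      · simp only [if_pos hne]
        rw [ih]
        by_cases hdk : dk = role
        · subst hdk
          have : PySem.Dict.get? ri dk = none := by
            rw [PySem.Dict.get?_eq_none_iff_contains]; exact hne.2
          rw [this, PySem.Dict.get?_insert_self]
          simp [hne.1]
        · rw [PySem.Dict.get?_insert_of_ne _ _ hdk]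
          cases PySem.Dict.get? ri dk with
          | some v => rfl
          | none =>
            simp only []
            rw [if_neg (by rintro ⟨_, rfl⟩; exact hdk rfl)]
      · simp only [if_neg hne]
        rw [ih]
        cases hri : PySem.Dict.get? ri dk with
        | some v => rfl
        | none =>
          push Not at hne
          by_cases hr : role ≠ "" ∧ role = dk
          · exfalso
            have := hne hr.1
            rw [hr.2, PySem.Dict.contains_eq_isSome_get?, hri] at this
            simp at this
          · simp only [if_neg hr]

-- membership in set(fm.keys) equals fm.contains
theorem keys_contains_eq (fm : PySem.Dict String (List (String × String))) (dk : String) :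
    List.contains (PySem.Set.ofList (PySem.Dict.keys fm)) dk = fm.contains dk := by
  rw [PySem.Dict.contains_eq_decide_mem_keys]
  simp [PySem.Set.mem_ofList]

-- D_'s find?-based first-match scan equals B's recursive one
theorem pvFirstRoleKey_eq_pvFindRole (l : List (String × List (String × String))) (dk : String) :
    pvFirstRoleKey l dk = pvFindRole l dk := by
  induction l with
  | nil => rfl
  | cons p rest ih =>
    obtain ⟨k, entry⟩ := p
    simp only [pvFirstRoleKey, pvFindRole, List.find?_cons] at *
    cases hrole : PySem.Dict.get? (PySem.Dict.ofList entry) "role" with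
    | none =>
      have hD : PySem.Dict.getD (PySem.Dict.ofList entry) "role" "" = "" :=
        PySem.Dict.getD_of_get?_eq_none _ _ hrole
      by_cases hdk : dk = ""
      · subst hdk; simpa using ih
      · simp only [hD]
        have : ((dk != "") && ("" == dk)) = false := by
          simp [bne_iff_ne, hdk, Ne.symm hdk]
        rw [this]; exact ih
    | some role =>
      have hD : PySem.Dict.getD (PySem.Dict.ofList entry) "role" "" = role :=
        PySem.Dict.getD_of_get?_eq_some _ _ hrole
      simp only [hD]
      by_cases hr : role ≠ "" ∧ role = dk
      · obtain ⟨h1, h2⟩ := hr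
        subst h2
        have : ((role != "") && (role == role)) = true := by
          simp [bne_iff_ne, h1]
        rw [this, if_pos ⟨h1, rfl⟩]; rfl
      · have : ((dk != "") && (role == dk)) = false := by
          by_cases h1 : role = dk
          · subst h1
            have : role = "" := by
              by_contra hne; exact hr ⟨hne, rfl⟩
            simp [this]
          · simp [h1]
        rw [this, if_neg hr]; exact ih

theorem route_by_role_py_spec : Claim_unchanged_route_by_role_py := by
  intro data field_map _ hnd
  unfold route_by_role_py route_by_role_py_alt
  simp only []
  congr 1
  apply PySem.List.foldl_congr_mem
  intro r p hp
  rw [keys_contains_eq]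
  by_cases h : (PySem.Dict.ofList field_map).contains p.1
  · simp [h]
  · simp only [Bool.not_eq_true] at h
    simp only [h]
    rw [roleIndex_get?_eq, PySem.Dict.get?_empty]
    simp only []
    cases hf : pvFindRole (PySem.Dict.items (PySem.Dict.ofList field_map)) p.1 with
    | none => rfl
    | some k =>
      have hk : k ≠ "" := by
        intro hk0
        apply hnd
        unfold D_route_by_role_py
        rw [List.any_eq_true]
        refine ⟨p.1, PySem.Dict.mem_keys_of_mem_items _ hp, ?_⟩
        rw [pvFirstRoleKey_eq_pvFindRole, hf, hk0, h]
        simp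
      simp [hk]

theorem route_by_role_py_changed : Claim_changed_route_by_role_py := by
  unfold Claim_changed_route_by_role_py; decide

-- ----- tightness: inside D_, A's routed dict contains the matched data key, B's never does -----

-- A's routing step only ever inserts, so containment is preserved
theorem aFold_contains_mono (keys : List String) (ri : PySem.Dict String String)
    (l : List (String × String)) (r : PySem.Dict String String) (x : String)
    (h : r.contains x = true) :
    (l.foldl (fun r p =>
      if keys.contains p.1 then r.insert p.1 p.2
      else
        match PySem.Dict.get? ri p.1 with
        | some target => if target ≠ "" then r.insert target p.2 else r.insert p.1 p.2
        | none => r.insert p.1 p.2) r).contains x = true := by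
  induction l generalizing r with
  | nil => exact h
  | cons p rest ih =>
    simp only [List.foldl_cons]
    apply ih
    by_cases hk : keys.contains p.1
    · rw [if_pos hk]; simp [PySem.Dict.contains_insert, h]
    · simp only [Bool.not_eq_true] at hk
      simp only [hk]
      cases PySem.Dict.get? ri p.1 with
      | none => simp [PySem.Dict.contains_insert, h]
      | some target =>
        by_cases ht : target ≠ "" <;> simp [ht, PySem.Dict.contains_insert, h]

-- A's fold contains dk once some data pair carries key dk, when dk misses keys and ri maps it to ""
theorem aFold_contains (keys : List String) (ri : PySem.Dict String String)
    (l : List (String × String)) (r : PySem.Dict String String) (dk : String)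
    (h1 : keys.contains dk = false) (h2 : PySem.Dict.get? ri dk = some "")
    (hm : dk ∈ l.map Prod.fst) :
    (l.foldl (fun r p =>
      if keys.contains p.1 then r.insert p.1 p.2
      else
        match PySem.Dict.get? ri p.1 with
        | some target => if target ≠ "" then r.insert target p.2 else r.insert p.1 p.2
        | none => r.insert p.1 p.2) r).contains dk = true := by
  induction l generalizing r with
  | nil => simp at hm
  | cons p rest ih =>
    simp only [List.map_cons, List.mem_cons] at hm
    simp only [List.foldl_cons]
    rcases hm with hm | hm
    · subst hm
      apply aFold_contains_mono
      simp only [h1, h2, if_neg (Bool.false_ne_true), ne_eq, not_true_eq_false,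
        if_false]
      simp
    · exact ih _ hm

theorem pvFindRole_key_mem (l : List (String × List (String × String))) (dk k : String)
    (h : pvFindRole l dk = some k) : k ∈ l.map Prod.fst := by
  induction l with
  | nil => simp [pvFindRole] at h
  | cons p rest ih =>
    obtain ⟨k0, entry⟩ := p
    simp only [pvFindRole] at h
    split at h
    · split at h
      · simp only [Option.some.injEq] at h
        simp [h]
      · simp [ih h]
    · simp [ih h]

-- B's fold never inserts dk when dk misses field_map and its first role match has key ""
theorem bFold_ncontains (fm : PySem.Dict String (List (String × String)))
    (l : List (String × String)) (r : PySem.Dict String String) (dk : String)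
    (hc : fm.contains dk = false)
    (hf : pvFindRole (PySem.Dict.items fm) dk = some "")
    (h0 : r.contains dk = false) :
    (l.foldl (fun r p =>
      if fm.contains p.1 then r.insert p.1 p.2
      else
        match pvFindRole (PySem.Dict.items fm) p.1 with
        | some k => r.insert k p.2
        | none => r.insert p.1 p.2) r).contains dk = false := by
  induction l generalizing r with
  | nil => exact h0
  | cons p rest ih =>
    simp only [List.foldl_cons]
    apply ih
    by_cases hk : fm.contains p.1
    · have hne : dk ≠ p.1 := by intro h; rw [h, hk] at hc; simp at hc
      simp [hk, PySem.Dict.contains_insert, hne, h0]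
    · simp only [Bool.not_eq_true] at hk
      simp only [hk, if_neg (Bool.false_ne_true)]
      cases hfr : pvFindRole (PySem.Dict.items fm) p.1 with
      | none =>
        have hne : dk ≠ p.1 := by
          intro h; rw [← h, hf] at hfr; simp at hfr
        simp [PySem.Dict.contains_insert, hne, h0]
      | some k =>
        have hkmem : k ∈ (PySem.Dict.items fm).map Prod.fst := pvFindRole_key_mem _ _ _ hfr
        have hkc : fm.contains k = true := by
          rw [PySem.Dict.contains_iff_mem_keys]
          simpa [PySem.Dict.keys] using hkmem
        have hne : dk ≠ k := by intro h; rw [h, hkc] at hc; simp at hc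
        simp [PySem.Dict.contains_insert, hne, h0]

theorem route_by_role_py_tight : Claim_exact_route_by_role_py := by
  intro data field_map _ hD heq
  unfold D_route_by_role_py at hD
  rw [List.any_eq_true] at hD
  obtain ⟨dk, hdkmem, hb⟩ := hD
  rw [Bool.and_eq_true, Bool.not_eq_true', beq_iff_eq] at hb
  obtain ⟨hc, hfk⟩ := hb
  rw [pvFirstRoleKey_eq_pvFindRole] at hfk
  unfold route_by_role_py route_by_role_py_alt at heq
  simp only [] at heq
  have hdkeq := PySem.Dict.ext heq
  have hcontains := congrArg (fun d => PySem.Dict.contains d dk) hdkeq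
  simp only [] at hcontains
  have hmem : dk ∈ (PySem.Dict.items (PySem.Dict.ofList data)).map Prod.fst := by
    simpa [PySem.Dict.keys] using hdkmem
  have hA : _ = true := aFold_contains
    (PySem.Set.ofList (PySem.Dict.keys (PySem.Dict.ofList field_map)))
    ((PySem.Dict.items (PySem.Dict.ofList field_map)).foldl (fun ri p =>
      match PySem.Dict.get? (PySem.Dict.ofList p.2) "role" with
      | some role => if role ≠ "" ∧ ri.contains role = false then ri.insert role p.1 else ri
      | none => ri) PySem.Dict.empty)
    (PySem.Dict.items (PySem.Dict.ofList data)) PySem.Dict.empty dk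
    (by rw [keys_contains_eq]; exact hc)
    (by rw [roleIndex_get?_eq, PySem.Dict.get?_empty]; exact hfk)
    hmem
  have hB : _ = false := bFold_ncontains (PySem.Dict.ofList field_map)
    (PySem.Dict.items (PySem.Dict.ofList data)) PySem.Dict.empty dk hc hfk
    (PySem.Dict.contains_empty dk)
  rw [hA, hB] at hcontains
  simp at hcontains
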